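-- pv_equiv track=rewrite | github.com/YuanzhongLi/Practice_Competitive_Programming_Python | LeetCode/problems/1020.py | check
-- ===== SOURCE A (Python) =====
-- dy = [-1, 0, 1, 0]
--
-- dx = [0, 1, 0, -1]
--
-- def check(land, H, W):
--     y = land // W
--     x = land % W
--     for i in range(4):
--         y_ = y + dy[i]
--         x_ = x + dx[i]
--         if not (0 <= y_ and y_ < H and 0 <= x_ and x_ < W):
--             return False
--
--     return True
-- ===== SOURCE B (Python) =====
-- def check(land, H, W):
--     y, x = divmod(land, W)
--     return 1 <= y <= H - 2 and 1 <= x <= W - 2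
-- ===== Notes on version B (the rewrite author's own statement) =====
-- stated objective: simpler
-- what changed: Replaces the loop over the four dy/dx neighbor offsets with the closed-form predicate 1 <= y <= H-2 and 1 <= x <= W-2 derived algebraically from the offsets.
import Mathlib
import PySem

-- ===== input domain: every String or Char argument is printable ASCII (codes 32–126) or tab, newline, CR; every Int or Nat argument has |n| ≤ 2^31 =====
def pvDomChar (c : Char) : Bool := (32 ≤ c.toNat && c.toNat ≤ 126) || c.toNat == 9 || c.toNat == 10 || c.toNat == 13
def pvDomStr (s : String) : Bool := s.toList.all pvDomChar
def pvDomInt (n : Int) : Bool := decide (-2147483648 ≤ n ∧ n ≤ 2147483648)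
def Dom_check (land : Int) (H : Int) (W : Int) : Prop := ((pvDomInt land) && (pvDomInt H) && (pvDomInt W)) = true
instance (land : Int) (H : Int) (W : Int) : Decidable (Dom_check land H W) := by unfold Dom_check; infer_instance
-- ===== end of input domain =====

-- B replaces the 4-iteration dy/dx neighbor loop by the closed-form predicate 1 ≤ y ≤ H-2 ∧ 1 ≤ x ≤ W-2 (simpler).

-- ===== PORT A =====
def dyA : List Int := [-1, 0, 1, 0]
def dxA : List Int := [0, 1, 0, -1]

-- the for-loop with early return False; indices come from range(4), all in bounds, so pyGetD is exact here
def checkLoop (y x H W : Int) : List Int → Bool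
  | [] => true
  | i :: rest =>
    let y_ := y + PySem.List.pyGetD dyA i 0
    let x_ := x + PySem.List.pyGetD dxA i 0
    if ¬(0 ≤ y_ ∧ y_ < H ∧ 0 ≤ x_ ∧ x_ < W) then false
    else checkLoop y x H W rest

def check (land : Int) (H : Int) (W : Int) : Bool :=
  let y := PySem.Int.floordiv land W
  let x := PySem.Int.mod land W
  checkLoop y x H W (PySem.List.pyRange 0 4 1)

-- ===== PORT B =====
def check_alt (land : Int) (H : Int) (W : Int) : Bool :=
  let y := PySem.Int.floordiv land W
  let x := PySem.Int.mod land W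
  decide (1 ≤ y) && decide (y ≤ H - 2) && decide (1 ≤ x) && decide (x ≤ W - 2)

-- ===== PRECONDITION & SPEC =====
-- Pre_ excludes W = 0, where both Pythons raise ZeroDivisionError.
def Pre_check (land : Int) (H : Int) (W : Int) : Prop := W ≠ 0
instance (land : Int) (H : Int) (W : Int) : Decidable (Pre_check land H W) := by unfold Pre_check; infer_instance
def pvWitness_check : Int × Int × Int := (4, 3, 3)

def Spec_check (land : Int) (H : Int) (W : Int) (out : Bool) : Prop := out = check_alt land H W
instance (land : Int) (H : Int) (W : Int) (out : Bool) : Decidable (Spec_check land H W out) := by unfold Spec_check; infer_instance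

-- ===== CLAIM (what is proved, stated in full; the proofs are below) =====
def Claim_equal_check : Prop := ∀ (land : Int) (H : Int) (W : Int), Dom_check land H W → Pre_check land H W → Spec_check land H W (check land H W)

-- ===== LEMMAS AND PROOFS =====

-- ===== VERDICT (by name: the statement is the Claim_ definition above) =====
theorem check_spec : Claim_equal_check := by
  intro land H W _ _
  unfold Spec_check check check_alt
  set y := PySem.Int.floordiv land W with hy
  set x := PySem.Int.mod land W with hx
  have h4 : PySem.List.pyRange 0 4 1 = [0, 1, 2, 3] := by decide
  rw [h4]
  simp only [checkLoop, dyA, dxA]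
  norm_num [show PySem.List.pyGetD ([-1, 0, 1, 0] : List Int) 0 0 = -1 from by decide,
    show PySem.List.pyGetD ([-1, 0, 1, 0] : List Int) 1 0 = 0 from by decide,
    show PySem.List.pyGetD ([-1, 0, 1, 0] : List Int) 2 0 = 1 from by decide,
    show PySem.List.pyGetD ([-1, 0, 1, 0] : List Int) 3 0 = 0 from by decide,
    show PySem.List.pyGetD ([0, 1, 0, -1] : List Int) 0 0 = 0 from by decide,
    show PySem.List.pyGetD ([0, 1, 0, -1] : List Int) 1 0 = 1 from by decide,
    show PySem.List.pyGetD ([0, 1, 0, -1] : List Int) 2 0 = 0 from by decide,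
    show PySem.List.pyGetD ([0, 1, 0, -1] : List Int) 3 0 = -1 from by decide]
  rw [Bool.eq_iff_iff]
  simp only [Bool.and_eq_true, decide_eq_true_eq, Bool.not_eq_true', decide_eq_false_iff_not]
  omega
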